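-- pv_equiv track=rewrite | github.com/skuzzy447/Python-2d-shooter | generate_world.py | build_boulders
-- ===== SOURCE A (Python) =====
-- def build_boulders(tilemap):
--     height = len(tilemap)
--     if height == 0:
--         return tilemap
--     width = len(tilemap[0])
--     visited = [[False] * width for _ in range(height)]
--     for y in range(len(tilemap)):
--         for x in range(len(tilemap[y])):
--             if tilemap[y][x] == 59 and not visited[y][x]:
--                 boulder_tiles = []
--                 boulder_tiles.append((x, y))
--                 for x, y in boulder_tiles:
--                     n = tilemap[y-1][x] if y > 0 else 0
--                     s = tilemap[y+1][x] if y < height - 1 else 0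
--                     e = tilemap[y][x+1] if x < width - 1 else 0
--                     w = tilemap[y][x-1] if x > 0 else 0
--                     ne = tilemap[y-1][x+1] if y > 0 and x < width - 1 else 0
--                     nw = tilemap[y-1][x-1] if y > 0 and x > 0 else 0
--                     se = tilemap[y+1][x+1] if y < height - 1 and x < width - 1 else 0
--                     sw = tilemap[y+1][x-1] if y < height - 1 and x > 0 else 0
--                     if  n >= 32 and s >= 32 and  e >= 32 and  w >= 32 and  ne >= 32 and  nw >= 32 and  se >= 32 and  sw >= 32:
--                         tilemap[y][x] = 41
--                     if   n >= 32 and  s >= 32 and  e >= 32 and  w >= 32 and  ne >= 32 and  nw >= 32 and  se >= 32 and not  sw >= 32: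
--                         tilemap[y][x] = 60
--                     if   n >= 32 and  s >= 32 and  e >= 32 and  w >= 32 and  ne >= 32 and  nw >= 32 and not  se >= 32 and  sw >= 32:
--                         tilemap[y][x] = 52
--                     if   n >= 32 and  s >= 32 and  e >= 32 and  w >= 32 and  ne >= 32 and not  nw >= 32 and  se >= 32 and  sw >= 32:
--                         tilemap[y][x] = 61
--                     if   n >= 32 and  s >= 32 and  e >= 32 and  w >= 32 and not  ne >= 32 and  nw >= 32 and  se >= 32 and  sw >= 32:
--                         tilemap[y][x] = 63
--                     if   n >= 32 and  s >= 32 and  e >= 32 and not  w >= 32 and  se >= 32: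
--                         tilemap[y][x] = 40
--                     if   n >= 32 and  s >= 32 and not  e >= 32 and  w >= 32 and  sw >= 32:
--                         tilemap[y][x] = 42
--                     if   n >= 32 and not  s >= 32 and  e >= 32 and  w >= 32 and  ne >= 32 and  nw >= 32:
--                         tilemap[y][x] = 49
--                     if  not  n >= 32 and  s >= 32 and  e >= 32 and  w >= 32 and  se >= 32 and  sw >= 32:
--                         tilemap[y][x] = 33
--                     if   n >= 32 and  s >= 32 and  e >= 32 and  w >= 32 and not  se >= 32 and not  sw >= 32:
--                         tilemap[y][x] = 44
--                     if   n >= 32 and  s >= 32 and  e >= 32 and  w >= 32 and  ne >= 32 and not  nw >= 32 and not  se >= 32 and  sw >= 32: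
--                         tilemap[y][x] = 68
--                     if   n >= 32 and  s >= 32 and  e >= 32 and  w >= 32 and not  ne >= 32 and not  nw >= 32 and  se >= 32 and  sw >= 32:
--                         tilemap[y][x] = 36
--                     if   n >= 32 and  s >= 32 and  e >= 32 and  w >= 32 and  ne >= 32 and not  nw >= 32 and  se >= 32 and not  sw >= 32:
--                         tilemap[y][x] = 69
--                     if   n >= 32 and  s >= 32 and  e >= 32 and  w >= 32 and not  ne >= 32 and  nw >= 32 and  se >= 32 and not  sw >= 32:
--                         tilemap[y][x] = 62
--                     if   n >= 32 and  s >= 32 and  e >= 32 and  w >= 32 and not  ne >= 32 and  nw >= 32 and not  se >= 32 and  sw >= 32: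
--                         tilemap[y][x] = 70
--                     if   n >= 32 and  s >= 32 and  e >= 32 and  w >= 32 and  ne >= 32 and not  nw >= 32 and not  se >= 32 and not  sw >= 32:
--                         tilemap[y][x] = 65
--                     if   n >= 32 and  s >= 32 and  e >= 32 and  w >= 32 and not  ne >= 32 and  nw >= 32 and not  se >= 32 and not  sw >= 32:
--                         tilemap[y][x] = 66
--                     if   n >= 32 and  s >= 32 and  e >= 32 and  w >= 32 and not  ne >= 32 and not  nw >= 32 and  se >= 32 and not  sw >= 32:
--                         tilemap[y][x] = 64
--                     if   n >= 32 and  s >= 32 and  e >= 32 and  w >= 32 and not  ne >= 32 and not  nw >= 32 and not  se >= 32 and  sw >= 32: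
--                         tilemap[y][x] = 67
--                     if   n >= 32 and not  s >= 32 and  e >= 32 and not  w >= 32:
--                         tilemap[y][x] = 48
--                     if  not  n >= 32 and  s >= 32 and  e >= 32 and not  w >= 32 and  se >= 32:
--                         tilemap[y][x] = 32
--                     if   n >= 32 and not  s >= 32 and not  e >= 32 and  w >= 32:
--                         tilemap[y][x] = 50
--                     if  not  n >= 32 and  s >= 32 and not  e >= 32 and  w >= 32 and  sw >= 32:
--                         tilemap[y][x] = 34
--                     if  not  n >= 32 and not  s >= 32 and  e >= 32 and  w >= 32:
--                         tilemap[y][x] = 57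
--                     if   n >= 32 and  s >= 32 and not  e >= 32 and not  w >= 32:
--                         tilemap[y][x] = 43
--                     if   n >= 32 and not  s >= 32 and not  e >= 32 and not  w >= 32:
--                         tilemap[y][x] = 51
--                     if  not  n >= 32 and  s >= 32 and not  e >= 32 and not  w >= 32:
--                         tilemap[y][x] = 35
--                     if  not  n >= 32 and not  s >= 32 and  e >= 32 and not  w >= 32:
--                         tilemap[y][x] = 56
--                     if  not  n >= 32 and not  s >= 32 and not  e >= 32 and  w >= 32:
--                         tilemap[y][x] = 58
--                     if  not  n >= 32 and  s >= 32 and  e >= 32 and  w >= 32 and not se >= 32 and not sw >= 32: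
--                         tilemap[y][x] = 38
--                     if  not  n >= 32 and  s >= 32 and  e >= 32 and  w >= 32 and  se >= 32 and not sw >= 32:
--                         tilemap[y][x] = 33
--                     if  not  n >= 32 and  s >= 32 and  e >= 32 and  w >= 32 and not se >= 32 and sw >= 32:
--                         tilemap[y][x] = 33
--                     if   n >= 32 and not  s >= 32 and  e >= 32 and  w >= 32 and not ne >= 32 and not nw >= 32:
--                         tilemap[y][x] = 54
--                     if   n >= 32 and not  s >= 32 and  e >= 32 and  w >= 32 and not ne >= 32 and  nw >= 32:
--                         tilemap[y][x] = 49
--                     if   n >= 32 and not  s >= 32 and  e >= 32 and  w >= 32 and  ne >= 32 and not nw >= 32: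
--                         tilemap[y][x] = 49
--                     if  not  n >= 32 and  s >= 32 and  e >= 32 and not  w >= 32 and not se >= 32:
--                         tilemap[y][x] = 37
--                     if   n >= 32 and  s >= 32 and  e >= 32 and not  w >= 32 and not se >= 32:
--                         tilemap[y][x] = 45
--                     if   n >= 32 and  s >= 32 and not  e >= 32 and  w >= 32 and not sw >= 32:
--                         tilemap[y][x] = 47
--                     if  not  n >= 32 and  s >= 32 and not  e >= 32 and  w >= 32 and not sw >= 32:
--                         tilemap[y][x] = 39
--     return tilemap
-- ===== SOURCE B (Python) =====
-- def build_boulders(tilemap):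
--     if len(tilemap) == 0:
--         return tilemap
--     height = len(tilemap)
--     width = len(tilemap[0])
--     # 256-entry lookup table keyed by the 8-bit neighbor mask
--     # (bit 0=n, 1=s, 2=e, 3=w, 4=ne, 5=nw, 6=se, 7=sw; bit set = neighbor >= 32).
--     table = []
--     for m in range(256):
--         n, s, e, w = m & 1 != 0, m & 2 != 0, m & 4 != 0, m & 8 != 0
--         ne, nw, se, sw = m & 16 != 0, m & 32 != 0, m & 64 != 0, m & 128 != 0
--         t = 59
--         if n and s and e and w and ne and nw and se and sw: t = 41
--         if n and s and e and w and ne and nw and se and not sw: t = 60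
--         if n and s and e and w and ne and nw and not se and sw: t = 52
--         if n and s and e and w and ne and not nw and se and sw: t = 61
--         if n and s and e and w and not ne and nw and se and sw: t = 63
--         if n and s and e and not w and se: t = 40
--         if n and s and not e and w and sw: t = 42
--         if n and not s and e and w and ne and nw: t = 49
--         if not n and s and e and w and se and sw: t = 33
--         if n and s and e and w and not se and not sw: t = 44
--         if n and s and e and w and ne and not nw and not se and sw: t = 68
--         if n and s and e and w and not ne and not nw and se and sw: t = 36
--         if n and s and e and w and ne and not nw and se and not sw: t = 69
--         if n and s and e and w and not ne and nw and se and not sw: t = 62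
--         if n and s and e and w and not ne and nw and not se and sw: t = 70
--         if n and s and e and w and ne and not nw and not se and not sw: t = 65
--         if n and s and e and w and not ne and nw and not se and not sw: t = 66
--         if n and s and e and w and not ne and not nw and se and not sw: t = 64
--         if n and s and e and w and not ne and not nw and not se and sw: t = 67
--         if n and not s and e and not w: t = 48
--         if not n and s and e and not w and se: t = 32
--         if n and not s and not e and w: t = 50
--         if not n and s and not e and w and sw: t = 34
--         if not n and not s and e and w: t = 57
--         if n and s and not e and not w: t = 43
--         if n and not s and not e and not w: t = 51
--         if not n and s and not e and not w: t = 35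
--         if not n and not s and e and not w: t = 56
--         if not n and not s and not e and w: t = 58
--         if not n and s and e and w and not se and not sw: t = 38
--         if not n and s and e and w and se and not sw: t = 33
--         if not n and s and e and w and not se and sw: t = 33
--         if n and not s and e and w and not ne and not nw: t = 54
--         if n and not s and e and w and not ne and nw: t = 49
--         if n and not s and e and w and ne and not nw: t = 49
--         if not n and s and e and not w and not se: t = 37
--         if n and s and e and not w and not se: t = 45
--         if n and s and not e and w and not sw: t = 47
--         if not n and s and not e and w and not sw: t = 39
--         table.append(t)
--
--     def bit(y, x, b):
--         if 0 <= y < height and 0 <= x < width and tilemap[y][x] >= 32: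
--             return b
--         return 0
--
--     return [[table[bit(y-1, x, 1) | bit(y+1, x, 2) | bit(y, x+1, 4) | bit(y, x-1, 8)
--                    | bit(y-1, x+1, 16) | bit(y-1, x-1, 32) | bit(y+1, x+1, 64) | bit(y+1, x-1, 128)]
--              if v == 59 else v
--              for x, v in enumerate(row)]
--             for y, row in enumerate(tilemap)]
-- ===== Notes on version B (the rewrite author's own statement) =====
-- stated objective: idiomatic
-- what changed: B precomputes a 256-entry lookup table keyed by an 8-bit neighbour mask and builds the result grid in one non-mutating pass, instead of A's per-cell re-evaluation of the 39 rules with in-place writes (and A's dead visited/boulder_tiles machinery).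
-- outside the precondition, e.g. on build_boulders([[59], [59, 0, 0]]): A returns [[35], [51, 0, 0]], B returns [[35], [51, 0, 0]]
import Mathlib
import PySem

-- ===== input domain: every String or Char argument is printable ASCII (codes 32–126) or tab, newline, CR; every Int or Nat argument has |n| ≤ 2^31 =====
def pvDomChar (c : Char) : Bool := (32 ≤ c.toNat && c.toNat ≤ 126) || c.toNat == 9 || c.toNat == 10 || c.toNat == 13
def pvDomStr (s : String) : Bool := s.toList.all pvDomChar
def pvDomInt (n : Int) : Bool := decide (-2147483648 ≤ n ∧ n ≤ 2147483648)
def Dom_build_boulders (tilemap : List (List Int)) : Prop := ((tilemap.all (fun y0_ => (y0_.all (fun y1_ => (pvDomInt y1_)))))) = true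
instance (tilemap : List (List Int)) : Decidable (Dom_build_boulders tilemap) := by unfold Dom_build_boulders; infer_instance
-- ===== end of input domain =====

-- B replaces A's per-cell re-evaluation of the 39 edge rules by a 256-entry lookup table keyed
-- by an 8-bit neighbour mask and a single non-mutating pass (objective: idiomatic decomposition;
-- A mutates its argument in place, B does not — the equivalence proved is about the return value).

-- ===== PORT A =====
-- grid reads/writes: indices are always in range on admitted inputs (Pre_), so getD/set are exact
def pvGet (g : List (List Int)) (y x : Nat) : Int := (g.getD y []).getD x 0
def pvSet (g : List (List Int)) (y x : Nat) (v : Int) : List (List Int) :=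
  g.set y ((g.getD y []).set x v)

-- A's 39 `if <pattern>: tilemap[y][x] = v` statements, in source order (condition, value)
def pvRules (n s e w' ne nw se sw : Int) : List (Bool × Int) :=
[
   (decide (32 ≤ n ∧ 32 ≤ s ∧ 32 ≤ e ∧ 32 ≤ w' ∧ 32 ≤ ne ∧ 32 ≤ nw ∧ 32 ≤ se ∧ 32 ≤ sw), (41:Int)),
   (decide (32 ≤ n ∧ 32 ≤ s ∧ 32 ≤ e ∧ 32 ≤ w' ∧ 32 ≤ ne ∧ 32 ≤ nw ∧ 32 ≤ se ∧ ¬ 32 ≤ sw), (60:Int)),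
   (decide (32 ≤ n ∧ 32 ≤ s ∧ 32 ≤ e ∧ 32 ≤ w' ∧ 32 ≤ ne ∧ 32 ≤ nw ∧ ¬ 32 ≤ se ∧ 32 ≤ sw), (52:Int)),
   (decide (32 ≤ n ∧ 32 ≤ s ∧ 32 ≤ e ∧ 32 ≤ w' ∧ 32 ≤ ne ∧ ¬ 32 ≤ nw ∧ 32 ≤ se ∧ 32 ≤ sw), (61:Int)),
   (decide (32 ≤ n ∧ 32 ≤ s ∧ 32 ≤ e ∧ 32 ≤ w' ∧ ¬ 32 ≤ ne ∧ 32 ≤ nw ∧ 32 ≤ se ∧ 32 ≤ sw), (63:Int)),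
   (decide (32 ≤ n ∧ 32 ≤ s ∧ 32 ≤ e ∧ ¬ 32 ≤ w' ∧ 32 ≤ se), (40:Int)),
   (decide (32 ≤ n ∧ 32 ≤ s ∧ ¬ 32 ≤ e ∧ 32 ≤ w' ∧ 32 ≤ sw), (42:Int)),
   (decide (32 ≤ n ∧ ¬ 32 ≤ s ∧ 32 ≤ e ∧ 32 ≤ w' ∧ 32 ≤ ne ∧ 32 ≤ nw), (49:Int)),
   (decide (¬ 32 ≤ n ∧ 32 ≤ s ∧ 32 ≤ e ∧ 32 ≤ w' ∧ 32 ≤ se ∧ 32 ≤ sw), (33:Int)),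
   (decide (32 ≤ n ∧ 32 ≤ s ∧ 32 ≤ e ∧ 32 ≤ w' ∧ ¬ 32 ≤ se ∧ ¬ 32 ≤ sw), (44:Int)),
   (decide (32 ≤ n ∧ 32 ≤ s ∧ 32 ≤ e ∧ 32 ≤ w' ∧ 32 ≤ ne ∧ ¬ 32 ≤ nw ∧ ¬ 32 ≤ se ∧ 32 ≤ sw), (68:Int)),
   (decide (32 ≤ n ∧ 32 ≤ s ∧ 32 ≤ e ∧ 32 ≤ w' ∧ ¬ 32 ≤ ne ∧ ¬ 32 ≤ nw ∧ 32 ≤ se ∧ 32 ≤ sw), (36:Int)),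
   (decide (32 ≤ n ∧ 32 ≤ s ∧ 32 ≤ e ∧ 32 ≤ w' ∧ 32 ≤ ne ∧ ¬ 32 ≤ nw ∧ 32 ≤ se ∧ ¬ 32 ≤ sw), (69:Int)),
   (decide (32 ≤ n ∧ 32 ≤ s ∧ 32 ≤ e ∧ 32 ≤ w' ∧ ¬ 32 ≤ ne ∧ 32 ≤ nw ∧ 32 ≤ se ∧ ¬ 32 ≤ sw), (62:Int)),
   (decide (32 ≤ n ∧ 32 ≤ s ∧ 32 ≤ e ∧ 32 ≤ w' ∧ ¬ 32 ≤ ne ∧ 32 ≤ nw ∧ ¬ 32 ≤ se ∧ 32 ≤ sw), (70:Int)),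
   (decide (32 ≤ n ∧ 32 ≤ s ∧ 32 ≤ e ∧ 32 ≤ w' ∧ 32 ≤ ne ∧ ¬ 32 ≤ nw ∧ ¬ 32 ≤ se ∧ ¬ 32 ≤ sw), (65:Int)),
   (decide (32 ≤ n ∧ 32 ≤ s ∧ 32 ≤ e ∧ 32 ≤ w' ∧ ¬ 32 ≤ ne ∧ 32 ≤ nw ∧ ¬ 32 ≤ se ∧ ¬ 32 ≤ sw), (66:Int)),
   (decide (32 ≤ n ∧ 32 ≤ s ∧ 32 ≤ e ∧ 32 ≤ w' ∧ ¬ 32 ≤ ne ∧ ¬ 32 ≤ nw ∧ 32 ≤ se ∧ ¬ 32 ≤ sw), (64:Int)),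
   (decide (32 ≤ n ∧ 32 ≤ s ∧ 32 ≤ e ∧ 32 ≤ w' ∧ ¬ 32 ≤ ne ∧ ¬ 32 ≤ nw ∧ ¬ 32 ≤ se ∧ 32 ≤ sw), (67:Int)),
   (decide (32 ≤ n ∧ ¬ 32 ≤ s ∧ 32 ≤ e ∧ ¬ 32 ≤ w'), (48:Int)),
   (decide (¬ 32 ≤ n ∧ 32 ≤ s ∧ 32 ≤ e ∧ ¬ 32 ≤ w' ∧ 32 ≤ se), (32:Int)),
   (decide (32 ≤ n ∧ ¬ 32 ≤ s ∧ ¬ 32 ≤ e ∧ 32 ≤ w'), (50:Int)),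
   (decide (¬ 32 ≤ n ∧ 32 ≤ s ∧ ¬ 32 ≤ e ∧ 32 ≤ w' ∧ 32 ≤ sw), (34:Int)),
   (decide (¬ 32 ≤ n ∧ ¬ 32 ≤ s ∧ 32 ≤ e ∧ 32 ≤ w'), (57:Int)),
   (decide (32 ≤ n ∧ 32 ≤ s ∧ ¬ 32 ≤ e ∧ ¬ 32 ≤ w'), (43:Int)),
   (decide (32 ≤ n ∧ ¬ 32 ≤ s ∧ ¬ 32 ≤ e ∧ ¬ 32 ≤ w'), (51:Int)),
   (decide (¬ 32 ≤ n ∧ 32 ≤ s ∧ ¬ 32 ≤ e ∧ ¬ 32 ≤ w'), (35:Int)),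
   (decide (¬ 32 ≤ n ∧ ¬ 32 ≤ s ∧ 32 ≤ e ∧ ¬ 32 ≤ w'), (56:Int)),
   (decide (¬ 32 ≤ n ∧ ¬ 32 ≤ s ∧ ¬ 32 ≤ e ∧ 32 ≤ w'), (58:Int)),
   (decide (¬ 32 ≤ n ∧ 32 ≤ s ∧ 32 ≤ e ∧ 32 ≤ w' ∧ ¬ 32 ≤ se ∧ ¬ 32 ≤ sw), (38:Int)),
   (decide (¬ 32 ≤ n ∧ 32 ≤ s ∧ 32 ≤ e ∧ 32 ≤ w' ∧ 32 ≤ se ∧ ¬ 32 ≤ sw), (33:Int)),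
   (decide (¬ 32 ≤ n ∧ 32 ≤ s ∧ 32 ≤ e ∧ 32 ≤ w' ∧ ¬ 32 ≤ se ∧ 32 ≤ sw), (33:Int)),
   (decide (32 ≤ n ∧ ¬ 32 ≤ s ∧ 32 ≤ e ∧ 32 ≤ w' ∧ ¬ 32 ≤ ne ∧ ¬ 32 ≤ nw), (54:Int)),
   (decide (32 ≤ n ∧ ¬ 32 ≤ s ∧ 32 ≤ e ∧ 32 ≤ w' ∧ ¬ 32 ≤ ne ∧ 32 ≤ nw), (49:Int)),
   (decide (32 ≤ n ∧ ¬ 32 ≤ s ∧ 32 ≤ e ∧ 32 ≤ w' ∧ 32 ≤ ne ∧ ¬ 32 ≤ nw), (49:Int)),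
   (decide (¬ 32 ≤ n ∧ 32 ≤ s ∧ 32 ≤ e ∧ ¬ 32 ≤ w' ∧ ¬ 32 ≤ se), (37:Int)),
   (decide (32 ≤ n ∧ 32 ≤ s ∧ 32 ≤ e ∧ ¬ 32 ≤ w' ∧ ¬ 32 ≤ se), (45:Int)),
   (decide (32 ≤ n ∧ 32 ≤ s ∧ ¬ 32 ≤ e ∧ 32 ≤ w' ∧ ¬ 32 ≤ sw), (47:Int)),
   (decide (¬ 32 ≤ n ∧ 32 ≤ s ∧ ¬ 32 ≤ e ∧ 32 ≤ w' ∧ ¬ 32 ≤ sw), (39:Int))]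

-- the body of A's inner `for x, y in boulder_tiles` loop (boulder_tiles is always the single
-- pair (x, y)): read the eight neighbours once, then perform the 39 conditional writes in order
def pvStep (h w : Nat) (g : List (List Int)) (y x : Nat) : List (List Int) :=
  let n  := if 0 < y then pvGet g (y-1) x else 0
  let s  := if y < h - 1 then pvGet g (y+1) x else 0
  let e  := if x < w - 1 then pvGet g y (x+1) else 0
  let w' := if 0 < x then pvGet g y (x-1) else 0
  let ne := if 0 < y ∧ x < w - 1 then pvGet g (y-1) (x+1) else 0
  let nw := if 0 < y ∧ 0 < x then pvGet g (y-1) (x-1) else 0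
  let se := if y < h - 1 ∧ x < w - 1 then pvGet g (y+1) (x+1) else 0
  let sw := if y < h - 1 ∧ 0 < x then pvGet g (y+1) (x-1) else 0
  (pvRules n s e w' ne nw se sw).foldl
    (fun g cv => if cv.1 then pvSet g y x cv.2 else g) g

def build_boulders (tilemap : List (List Int)) : List (List Int) :=
  let height := tilemap.length
  if height = 0 then tilemap
  else
    let width := (tilemap.getD 0 []).length
    let visited := (List.range height).map (fun _ => List.replicate width false)
    (List.range height).foldl
      (fun g y =>
        (List.range ((g.getD y []).length)).foldl
          (fun g x =>
            if pvGet g y x == 59 && !((visited.getD y []).getD x false) then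
              pvStep height width g y x
            else g)
          g)
      tilemap

-- ===== PORT B =====
-- Source B's table rules: the same 39 rules, last match wins, default 59
def pvRuleVal (n s e w ne nw se sw : Bool) : Int :=
  let t : Int := 59
  let t := if n && s && e && w && ne && nw && se && sw then (41:Int) else t
  let t := if n && s && e && w && ne && nw && se && !sw then (60:Int) else t
  let t := if n && s && e && w && ne && nw && !se && sw then (52:Int) else t
  let t := if n && s && e && w && ne && !nw && se && sw then (61:Int) else t
  let t := if n && s && e && w && !ne && nw && se && sw then (63:Int) else t
  let t := if n && s && e && !w && se then (40:Int) else t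
  let t := if n && s && !e && w && sw then (42:Int) else t
  let t := if n && !s && e && w && ne && nw then (49:Int) else t
  let t := if !n && s && e && w && se && sw then (33:Int) else t
  let t := if n && s && e && w && !se && !sw then (44:Int) else t
  let t := if n && s && e && w && ne && !nw && !se && sw then (68:Int) else t
  let t := if n && s && e && w && !ne && !nw && se && sw then (36:Int) else t
  let t := if n && s && e && w && ne && !nw && se && !sw then (69:Int) else t
  let t := if n && s && e && w && !ne && nw && se && !sw then (62:Int) else t
  let t := if n && s && e && w && !ne && nw && !se && sw then (70:Int) else t
  let t := if n && s && e && w && ne && !nw && !se && !sw then (65:Int) else t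
  let t := if n && s && e && w && !ne && nw && !se && !sw then (66:Int) else t
  let t := if n && s && e && w && !ne && !nw && se && !sw then (64:Int) else t
  let t := if n && s && e && w && !ne && !nw && !se && sw then (67:Int) else t
  let t := if n && !s && e && !w then (48:Int) else t
  let t := if !n && s && e && !w && se then (32:Int) else t
  let t := if n && !s && !e && w then (50:Int) else t
  let t := if !n && s && !e && w && sw then (34:Int) else t
  let t := if !n && !s && e && w then (57:Int) else t
  let t := if n && s && !e && !w then (43:Int) else t
  let t := if n && !s && !e && !w then (51:Int) else t
  let t := if !n && s && !e && !w then (35:Int) else t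
  let t := if !n && !s && e && !w then (56:Int) else t
  let t := if !n && !s && !e && w then (58:Int) else t
  let t := if !n && s && e && w && !se && !sw then (38:Int) else t
  let t := if !n && s && e && w && se && !sw then (33:Int) else t
  let t := if !n && s && e && w && !se && sw then (33:Int) else t
  let t := if n && !s && e && w && !ne && !nw then (54:Int) else t
  let t := if n && !s && e && w && !ne && nw then (49:Int) else t
  let t := if n && !s && e && w && ne && !nw then (49:Int) else t
  let t := if !n && s && e && !w && !se then (37:Int) else t
  let t := if n && s && e && !w && !se then (45:Int) else t
  let t := if n && s && !e && w && !sw then (47:Int) else t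
  let t := if !n && s && !e && w && !sw then (39:Int) else t
  t

-- Source B: `table`, built once by iterating the 256 masks
def pvTable : List Int :=
  (List.range 256).map (fun m =>
    pvRuleVal (m &&& 1 != 0) (m &&& 2 != 0) (m &&& 4 != 0) (m &&& 8 != 0)
      (m &&& 16 != 0) (m &&& 32 != 0) (m &&& 64 != 0) (m &&& 128 != 0))

-- Source B: `bit(y, x, b)`
def pvBit (g : List (List Int)) (h w : Nat) (y x : Int) (b : Nat) : Nat :=
  if 0 ≤ y ∧ y < (h:Int) ∧ 0 ≤ x ∧ x < (w:Int) ∧ 32 ≤ pvGet g y.toNat x.toNat then b else 0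

-- Source B: the `table[bit(...) | ... | bit(...)]` cell expression
def pvAltCell (g : List (List Int)) (h w y x : Nat) : Int :=
  pvTable.getD
    (pvBit g h w ((y:Int)-1) x 1 ||| pvBit g h w ((y:Int)+1) x 2 |||
     pvBit g h w y ((x:Int)+1) 4 ||| pvBit g h w y ((x:Int)-1) 8 |||
     pvBit g h w ((y:Int)-1) ((x:Int)+1) 16 ||| pvBit g h w ((y:Int)-1) ((x:Int)-1) 32 |||
     pvBit g h w ((y:Int)+1) ((x:Int)+1) 64 ||| pvBit g h w ((y:Int)+1) ((x:Int)-1) 128) 0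

def build_boulders_alt (tilemap : List (List Int)) : List (List Int) :=
  if tilemap.length = 0 then tilemap
  else
    let h := tilemap.length
    let w := (tilemap.getD 0 []).length
    tilemap.mapIdx (fun y row =>
      row.mapIdx (fun x v => if v == 59 then pvAltCell tilemap h w y x else v))

-- ===== PRECONDITION & SPEC =====
-- Pre_ excludes ragged grids that contain a 59 tile: there A's neighbour reads (indexed with
-- row 0's width) usually raise IndexError, and where they happen to stay in range A's value
-- depends on out-of-row reads that B does not perform.
def Pre_build_boulders (tilemap : List (List Int)) : Prop :=
  (∀ row ∈ tilemap, row.length = (tilemap.getD 0 []).length) ∨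
  (∀ row ∈ tilemap, (59:Int) ∉ row)
instance (tilemap : List (List Int)) : Decidable (Pre_build_boulders tilemap) := by
  unfold Pre_build_boulders; infer_instance

def pvWitness_build_boulders : List (List Int) := [[59, 59, 0], [59, 59, 59], [0, 59, 59]]

def Spec_build_boulders (tilemap : List (List Int)) (out : List (List Int)) : Prop :=
  out = build_boulders_alt tilemap
instance (tilemap : List (List Int)) (out : List (List Int)) : Decidable (Spec_build_boulders tilemap out) := by
  unfold Spec_build_boulders; infer_instance

-- ===== CLAIM (what is proved, stated in full; the proofs are below) =====
def Claim_equal_build_boulders : Prop := ∀ (tilemap : List (List Int)), Dom_build_boulders tilemap → Pre_build_boulders tilemap → Spec_build_boulders tilemap (build_boulders tilemap)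

-- ===== LEMMAS AND PROOFS =====

-- A's per-cell decision chain as a value: last matching rule wins, default 59
def pvChainVal (n s e w' ne nw se sw : Int) : Int :=
  (pvRules n s e w' ne nw se sw).foldl (fun t cv => if cv.1 then cv.2 else t) 59

-- the same rules over the 8 boolean flags (flag = neighbour ≥ 32)
def pvRulesB (n s e w ne nw se sw : Bool) : List (Bool × Int) :=
[
   (n && (s && (e && (w && (ne && (nw && (se && (sw))))))), (41:Int)),
   (n && (s && (e && (w && (ne && (nw && (se && (!sw))))))), (60:Int)),
   (n && (s && (e && (w && (ne && (nw && (!se && (sw))))))), (52:Int)),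
   (n && (s && (e && (w && (ne && (!nw && (se && (sw))))))), (61:Int)),
   (n && (s && (e && (w && (!ne && (nw && (se && (sw))))))), (63:Int)),
   (n && (s && (e && (!w && (se)))), (40:Int)),
   (n && (s && (!e && (w && (sw)))), (42:Int)),
   (n && (!s && (e && (w && (ne && (nw))))), (49:Int)),
   (!n && (s && (e && (w && (se && (sw))))), (33:Int)),
   (n && (s && (e && (w && (!se && (!sw))))), (44:Int)),
   (n && (s && (e && (w && (ne && (!nw && (!se && (sw))))))), (68:Int)),
   (n && (s && (e && (w && (!ne && (!nw && (se && (sw))))))), (36:Int)),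
   (n && (s && (e && (w && (ne && (!nw && (se && (!sw))))))), (69:Int)),
   (n && (s && (e && (w && (!ne && (nw && (se && (!sw))))))), (62:Int)),
   (n && (s && (e && (w && (!ne && (nw && (!se && (sw))))))), (70:Int)),
   (n && (s && (e && (w && (ne && (!nw && (!se && (!sw))))))), (65:Int)),
   (n && (s && (e && (w && (!ne && (nw && (!se && (!sw))))))), (66:Int)),
   (n && (s && (e && (w && (!ne && (!nw && (se && (!sw))))))), (64:Int)),
   (n && (s && (e && (w && (!ne && (!nw && (!se && (sw))))))), (67:Int)),
   (n && (!s && (e && (!w))), (48:Int)),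
   (!n && (s && (e && (!w && (se)))), (32:Int)),
   (n && (!s && (!e && (w))), (50:Int)),
   (!n && (s && (!e && (w && (sw)))), (34:Int)),
   (!n && (!s && (e && (w))), (57:Int)),
   (n && (s && (!e && (!w))), (43:Int)),
   (n && (!s && (!e && (!w))), (51:Int)),
   (!n && (s && (!e && (!w))), (35:Int)),
   (!n && (!s && (e && (!w))), (56:Int)),
   (!n && (!s && (!e && (w))), (58:Int)),
   (!n && (s && (e && (w && (!se && (!sw))))), (38:Int)),
   (!n && (s && (e && (w && (se && (!sw))))), (33:Int)),
   (!n && (s && (e && (w && (!se && (sw))))), (33:Int)),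
   (n && (!s && (e && (w && (!ne && (!nw))))), (54:Int)),
   (n && (!s && (e && (w && (!ne && (nw))))), (49:Int)),
   (n && (!s && (e && (w && (ne && (!nw))))), (49:Int)),
   (!n && (s && (e && (!w && (!se)))), (37:Int)),
   (n && (s && (e && (!w && (!se)))), (45:Int)),
   (n && (s && (!e && (w && (!sw)))), (47:Int)),
   (!n && (s && (!e && (w && (!sw)))), (39:Int))]

def pvBoolChainVal (n s e w ne nw se sw : Bool) : Int :=
  (pvRulesB n s e w ne nw se sw).foldl (fun t cv => if cv.1 then cv.2 else t) 59

-- pvTable, evaluated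
def pvTableLit : List Int := [59, 51, 35, 43, 56, 48, 37, 45, 58, 50, 39, 47, 57, 54, 38, 44, 59, 51, 35, 43, 56, 48, 37, 45, 58, 50, 39, 47, 57, 49, 38, 65, 59, 51, 35, 43, 56, 48, 37, 45, 58, 50, 39, 47, 57, 49, 38, 66, 59, 51, 35, 43, 56, 48, 37, 45, 58, 50, 39, 47, 57, 49, 38, 44, 59, 51, 35, 43, 56, 48, 32, 40, 58, 50, 39, 47, 57, 54, 33, 64, 59, 51, 35, 43, 56, 48, 32, 40, 58, 50, 39, 47, 57, 49, 33, 69, 59, 51, 35, 43, 56, 48, 32, 40, 58, 50, 39, 47, 57, 49, 33, 62, 59, 51, 35, 43, 56, 48, 32, 40, 58, 50, 39, 47, 57, 49, 33, 60, 59, 51, 35, 43, 56, 48, 37, 45, 58, 50, 34, 42, 57, 54, 33, 67, 59, 51, 35, 43, 56, 48, 37, 45, 58, 50, 34, 42, 57, 49, 33, 68, 59, 51, 35, 43, 56, 48, 37, 45, 58, 50, 34, 42, 57, 49, 33, 70, 59, 51, 35, 43, 56, 48, 37, 45, 58, 50, 34, 42, 57, 49, 33, 52, 59, 51, 35, 43,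 56, 48, 32, 40, 58, 50, 34, 42, 57, 54, 33, 36, 59, 51, 35, 43, 56, 48, 32, 40, 58, 50, 34, 42, 57, 49, 33, 61, 59, 51, 35, 43, 56, 48, 32, 40, 58, 50, 34, 42, 57, 49, 33, 63, 59, 51, 35, 43, 56, 48, 32, 40, 58, 50, 34, 42, 57, 49, 33, 41]

set_option maxRecDepth 8192 in
lemma pvTable_eq_lit : pvTable = pvTableLit := by decide

-- packing the 8 flags the way B's `bit` calls do
def pvPack (n s e w ne nw se sw : Bool) : Nat :=
  (if n then 1 else 0) ||| (if s then 2 else 0) ||| (if e then 4 else 0) ||| (if w then 8 else 0) |||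
  (if ne then 16 else 0) ||| (if nw then 32 else 0) ||| (if se then 64 else 0) ||| (if sw then 128 else 0)

set_option maxRecDepth 8192 in
lemma table_lookup (n s e w ne nw se sw : Bool) :
    pvTable.getD (pvPack n s e w ne nw se sw) 0 = pvBoolChainVal n s e w ne nw se sw := by
  rw [pvTable_eq_lit]; revert n s e w ne nw se sw; decide

set_option maxRecDepth 8192 in
lemma ruleVal_ge_32 (n s e w ne nw se sw : Bool) : 32 ≤ pvBoolChainVal n s e w ne nw se sw := by
  revert n s e w ne nw se sw; decide

lemma chainVal_eq_bool (n s e w' ne nw se sw : Int) :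
    pvChainVal n s e w' ne nw se sw =
      pvBoolChainVal (decide (32 ≤ n)) (decide (32 ≤ s)) (decide (32 ≤ e)) (decide (32 ≤ w'))
        (decide (32 ≤ ne)) (decide (32 ≤ nw)) (decide (32 ≤ se)) (decide (32 ≤ sw)) := by
  simp only [pvChainVal, pvBoolChainVal, pvRules, pvRulesB, Bool.decide_and, decide_not]

lemma set_set (g : List (List Int)) (y x : Nat) (a b : Int) :
    pvSet (pvSet g y x a) y x b = pvSet g y x b := by
  by_cases hy : y < g.length
  · simp [pvSet, List.getD, hy, List.set_set]
  · simp [pvSet, List.set_eq_of_length_le (by omega : g.length ≤ y)]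

lemma set_self (g : List (List Int)) (y x : Nat) (hy : y < g.length)
    (hx : x < (g.getD y []).length) : pvSet g y x (pvGet g y x) = g := by
  simp only [pvSet, pvGet, List.getD, List.getElem?_eq_getElem hy, Option.getD_some] at hx ⊢
  rw [List.getElem?_eq_getElem hx]
  simp [List.set_getElem_self]

lemma foldl_condSet (l : List (Bool × Int)) (g : List (List Int)) (y x : Nat) (a : Int) :
    l.foldl (fun g cv => if cv.1 then pvSet g y x cv.2 else g) (pvSet g y x a)
      = pvSet g y x (l.foldl (fun t cv => if cv.1 then cv.2 else t) a) := by
  induction l generalizing a with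
  | nil => rfl
  | cons cv l ih =>
    rcases cv with ⟨c, v⟩
    cases c <;> simp [set_set, ih]

-- pvStep collapses to a single write of the chain value
lemma step_eq_set (h w : Nat) (g : List (List Int)) (y x : Nat)
    (hy : y < g.length) (hx : x < (g.getD y []).length) (hcell : pvGet g y x = 59) :
    pvStep h w g y x =
      pvSet g y x (pvChainVal
        (if 0 < y then pvGet g (y-1) x else 0)
        (if y < h - 1 then pvGet g (y+1) x else 0)
        (if x < w - 1 then pvGet g y (x+1) else 0)
        (if 0 < x then pvGet g y (x-1) else 0)
        (if 0 < y ∧ x < w - 1 then pvGet g (y-1) (x+1) else 0)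
        (if 0 < y ∧ 0 < x then pvGet g (y-1) (x-1) else 0)
        (if y < h - 1 ∧ x < w - 1 then pvGet g (y+1) (x+1) else 0)
        (if y < h - 1 ∧ 0 < x then pvGet g (y+1) (x-1) else 0)) := by
  have hG : pvSet g y x 59 = g := by rw [← hcell]; exact set_self g y x hy hx
  simp only [pvStep, pvChainVal]
  rw [← hG, set_set]
  exact foldl_condSet _ _ _ _ _


-- the B-side boolean flags, as pvBit's guards state them
lemma altCell_eq_ruleVal (g : List (List Int)) (h w y x : Nat) :
    pvAltCell g h w y x =
      pvBoolChainVal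
        (decide (0 ≤ (y:Int)-1 ∧ (y:Int)-1 < (h:Int) ∧ 0 ≤ (x:Int) ∧ (x:Int) < (w:Int) ∧ 32 ≤ pvGet g ((y:Int)-1).toNat ((x:Int)).toNat))
        (decide (0 ≤ (y:Int)+1 ∧ (y:Int)+1 < (h:Int) ∧ 0 ≤ (x:Int) ∧ (x:Int) < (w:Int) ∧ 32 ≤ pvGet g ((y:Int)+1).toNat ((x:Int)).toNat))
        (decide (0 ≤ (y:Int) ∧ (y:Int) < (h:Int) ∧ 0 ≤ (x:Int)+1 ∧ (x:Int)+1 < (w:Int) ∧ 32 ≤ pvGet g ((y:Int)).toNat ((x:Int)+1).toNat))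
        (decide (0 ≤ (y:Int) ∧ (y:Int) < (h:Int) ∧ 0 ≤ (x:Int)-1 ∧ (x:Int)-1 < (w:Int) ∧ 32 ≤ pvGet g ((y:Int)).toNat ((x:Int)-1).toNat))
        (decide (0 ≤ (y:Int)-1 ∧ (y:Int)-1 < (h:Int) ∧ 0 ≤ (x:Int)+1 ∧ (x:Int)+1 < (w:Int) ∧ 32 ≤ pvGet g ((y:Int)-1).toNat ((x:Int)+1).toNat))
        (decide (0 ≤ (y:Int)-1 ∧ (y:Int)-1 < (h:Int) ∧ 0 ≤ (x:Int)-1 ∧ (x:Int)-1 < (w:Int) ∧ 32 ≤ pvGet g ((y:Int)-1).toNat ((x:Int)-1).toNat))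
        (decide (0 ≤ (y:Int)+1 ∧ (y:Int)+1 < (h:Int) ∧ 0 ≤ (x:Int)+1 ∧ (x:Int)+1 < (w:Int) ∧ 32 ≤ pvGet g ((y:Int)+1).toNat ((x:Int)+1).toNat))
        (decide (0 ≤ (y:Int)+1 ∧ (y:Int)+1 < (h:Int) ∧ 0 ≤ (x:Int)-1 ∧ (x:Int)-1 < (w:Int) ∧ 32 ≤ pvGet g ((y:Int)+1).toNat ((x:Int)-1).toNat)) := by
  rw [← table_lookup]
  unfold pvAltCell pvPack pvBit
  simp only [decide_eq_true_eq]

lemma altCell_ge_32 (g : List (List Int)) (h w y x : Nat) : 32 ≤ pvAltCell g h w y x := by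
  rw [altCell_eq_ruleVal]; exact ruleVal_ge_32 _ _ _ _ _ _ _ _


lemma mapIdx_ext_self (l : List Int) (f : Nat → Int → Int)
    (h : ∀ i (hi : i < l.length), f i l[i] = l[i]) : l.mapIdx f = l := by
  apply List.ext_getElem (by simp)
  intro i h1 h2
  simp only [List.getElem_mapIdx]
  exact h i h2

lemma gridIdx_congr (g : List (List Int)) (F G : Nat → Nat → Int → Int)
    (h : ∀ y x (hy : y < g.length) (hx : x < (g[y]'hy).length),
      F y x ((g[y]'hy)[x]'hx) = G y x ((g[y]'hy)[x]'hx)) :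
    g.mapIdx (fun y row => row.mapIdx (F y)) = g.mapIdx (fun y row => row.mapIdx (G y)) := by
  apply List.ext_getElem (by simp)
  intro y h1 h2
  simp only [List.getElem_mapIdx]
  apply List.ext_getElem (by simp)
  intro x h3 h4
  simp only [List.getElem_mapIdx]
  exact h y x (by simpa using h1) (by simpa using h3)

-- the partially rewritten grid: cells strictly before (Y, X) in row-major order are done
def pvMix (g : List (List Int)) (Y X : Nat) : List (List Int) :=
  g.mapIdx (fun y row => row.mapIdx (fun x v =>
    if (y < Y ∨ (y = Y ∧ x < X)) ∧ v = 59 then pvAltCell g g.length (g.getD 0 []).length y x else v))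

lemma mix_length (g : List (List Int)) (Y X : Nat) : (pvMix g Y X).length = g.length := by
  simp [pvMix]

lemma mix_row (g : List (List Int)) (Y X y : Nat) (hy : y < g.length) :
    (pvMix g Y X).getD y [] = (g.getD y []).mapIdx (fun x v =>
      if (y < Y ∨ (y = Y ∧ x < X)) ∧ v = 59 then pvAltCell g g.length (g.getD 0 []).length y x else v) := by
  simp [pvMix, List.getD, hy]

lemma mix_row_length (g : List (List Int)) (Y X y : Nat) :
    ((pvMix g Y X).getD y []).length = (g.getD y []).length := by
  by_cases hy : y < g.length
  · rw [mix_row g Y X y hy]; simp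
  · rw [List.getD_eq_default _ _ (by simpa [mix_length] using not_lt.mp hy),
        List.getD_eq_default _ _ (not_lt.mp hy)]

lemma mix_get (g : List (List Int)) (Y X y x : Nat) (hy : y < g.length)
    (hx : x < (g.getD y []).length) :
    pvGet (pvMix g Y X) y x =
      if (y < Y ∨ (y = Y ∧ x < X)) ∧ pvGet g y x = 59
      then pvAltCell g g.length (g.getD 0 []).length y x else pvGet g y x := by
  unfold pvGet
  rw [mix_row g Y X y hy, List.getD_eq_getElem _ _ (by simpa using hx),
      List.getD_eq_getElem _ _ hx, List.getElem_mapIdx]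

lemma mix_ge32 (g : List (List Int)) (Y X y x : Nat) :
    32 ≤ pvGet (pvMix g Y X) y x ↔ 32 ≤ pvGet g y x := by
  by_cases hy : y < g.length
  · by_cases hx : x < (g.getD y []).length
    · rw [mix_get g Y X y x hy hx]
      split
      · rename_i hcond
        exact iff_of_true (altCell_ge_32 _ _ _ _ _) (by rw [hcond.2]; norm_num)
      · rfl
    · unfold pvGet
      have h1 : ((pvMix g Y X).getD y []).length ≤ x := by
        rw [mix_row_length]; exact not_lt.mp hx
      rw [List.getD_eq_default _ _ h1, List.getD_eq_default _ _ (not_lt.mp hx)]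
  · unfold pvGet
    have h1 : ((pvMix g Y X).getD y []).length ≤ x := by
      rw [mix_row_length, List.getD_eq_default g _ (not_lt.mp hy)]; simp
    rw [List.getD_eq_default _ _ h1, List.getD_eq_default g _ (not_lt.mp hy)]
    rfl

lemma flag_iff (M g : List (List Int)) (h w : Nat)
    (hgeq : ∀ y x, 32 ≤ pvGet M y x ↔ 32 ≤ pvGet g y x)
    (cond : Prop) [Decidable cond] (yy xx : Nat) (Yi Xi : Int)
    (hcond : cond ↔ (0 ≤ Yi ∧ Yi < (h:Int) ∧ 0 ≤ Xi ∧ Xi < (w:Int)))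
    (hyy : cond → Yi.toNat = yy ∧ Xi.toNat = xx) :
    (32 ≤ (if cond then pvGet M yy xx else 0)) ↔
      (0 ≤ Yi ∧ Yi < (h:Int) ∧ 0 ≤ Xi ∧ Xi < (w:Int) ∧ 32 ≤ pvGet g Yi.toNat Xi.toNat) := by
  by_cases hc : cond
  · obtain ⟨e1, e2⟩ := hyy hc
    rw [if_pos hc, e1, e2]
    have hb := hcond.mp hc
    rw [hgeq]
    exact ⟨fun hv => ⟨hb.1, hb.2.1, hb.2.2.1, hb.2.2.2, hv⟩, fun hv => hv.2.2.2.2⟩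
  · rw [if_neg hc]
    exact iff_of_false (by norm_num)
      (fun hv => hc (hcond.mpr ⟨hv.1, hv.2.1, hv.2.2.1, hv.2.2.2.1⟩))

-- A's chain at (Y, X) over any ≥32-equivalent grid M computes B's table cell of g
lemma chain_eq_alt (g M : List (List Int))
    (hgeq : ∀ y x, 32 ≤ pvGet M y x ↔ 32 ≤ pvGet g y x)
    (Y X : Nat) (hY : Y < g.length) (hX : X < (g.getD 0 []).length) :
    pvChainVal
      (if 0 < Y then pvGet M (Y-1) X else 0)
      (if Y < g.length - 1 then pvGet M (Y+1) X else 0)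
      (if X < (g.getD 0 []).length - 1 then pvGet M Y (X+1) else 0)
      (if 0 < X then pvGet M Y (X-1) else 0)
      (if 0 < Y ∧ X < (g.getD 0 []).length - 1 then pvGet M (Y-1) (X+1) else 0)
      (if 0 < Y ∧ 0 < X then pvGet M (Y-1) (X-1) else 0)
      (if Y < g.length - 1 ∧ X < (g.getD 0 []).length - 1 then pvGet M (Y+1) (X+1) else 0)
      (if Y < g.length - 1 ∧ 0 < X then pvGet M (Y+1) (X-1) else 0)
    = pvAltCell g g.length (g.getD 0 []).length Y X := by
  rw [chainVal_eq_bool, altCell_eq_ruleVal]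
  congr 1 <;>
    refine decide_eq_decide.mpr (flag_iff M g _ _ hgeq _ _ _ _ _ (by omega) (by omega))

lemma set_mix (g : List (List Int)) (Y X : Nat) (hY : Y < g.length)
    (hX : X < (g.getD Y []).length) (h59 : pvGet g Y X = 59) :
    pvSet (pvMix g Y X) Y X (pvAltCell g g.length (g.getD 0 []).length Y X) = pvMix g Y (X+1) := by
  have hrowX : g[Y]'hY = g.getD Y [] := (List.getD_eq_getElem g [] hY).symm
  unfold pvSet
  apply List.ext_getElem (by simp [mix_length])
  intro j h1 h2
  have hjg : j < g.length := by simpa [mix_length] using h2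
  rw [List.getElem_set]
  have hmixj : ∀ (X' : Nat) (hh : j < (pvMix g Y X').length),
      (pvMix g Y X')[j]'hh = ((g[j]'hjg).mapIdx (fun x v =>
        if (j < Y ∨ (j = Y ∧ x < X')) ∧ v = 59
        then pvAltCell g g.length (g.getD 0 []).length j x else v)) := by
    intro X' hh
    simp [pvMix, List.getElem_mapIdx]
  rw [hmixj (X+1) h2]
  by_cases hj : Y = j
  · subst hj
    rw [if_pos rfl, mix_row g Y X Y hY]
    simp only [hrowX]
    apply List.ext_getElem (by simp)
    intro i h3 h4
    have hig : i < (g.getD Y []).length := by simpa using h4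
    rw [List.getElem_set, List.getElem_mapIdx, List.getElem_mapIdx]
    have hv : (g.getD Y [])[X]'hX = 59 := by
      have h' := h59
      unfold pvGet at h'
      rw [List.getD_eq_getElem _ 0 hX] at h'
      exact h'
    by_cases hi : X = i
    · subst hi
      rw [if_pos rfl, if_pos ⟨Or.inr ⟨trivial, Nat.lt_succ_self X⟩, hv⟩]
    · rw [if_neg hi]
      have hiff : ((Y < Y ∨ (True ∧ i < X)) ↔ (Y < Y ∨ (True ∧ i < X + 1))) := by
        simp only [true_and]
        omega
      rw [if_congr (and_congr_left fun _ => hiff) rfl rfl]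
  · rw [if_neg hj, hmixj X (by simpa [mix_length] using hjg)]
    refine congrArg (fun f => List.mapIdx f (g[j]'hjg)) ?_
    funext x v
    have hiff : ((j < Y ∨ (j = Y ∧ x < X)) ↔ (j < Y ∨ (j = Y ∧ x < X + 1))) := by omega
    rw [if_congr (and_congr_left fun _ => hiff) rfl rfl]

lemma mix_succ_of_ne (g : List (List Int)) (Y X : Nat) (h59 : pvGet g Y X ≠ 59) :
    pvMix g Y (X+1) = pvMix g Y X := by
  unfold pvMix
  apply gridIdx_congr
  intro y x hy hx
  by_cases hv : (g[y]'hy)[x]'hx = 59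
  · have hne : ¬ (y = Y ∧ x = X) := by
      rintro ⟨rfl, rfl⟩
      apply h59
      unfold pvGet
      rw [List.getD_eq_getElem _ _ hy, List.getD_eq_getElem _ _ hx]
      exact hv
    have : (y < Y ∨ (y = Y ∧ x < X + 1)) ↔ (y < Y ∨ (y = Y ∧ x < X)) := by
      omega
    rw [if_congr (and_congr_left fun _ => this) rfl rfl]
  · rw [if_neg (fun hc => hv hc.2), if_neg (fun hc => hv hc.2)]

lemma mix_zero (g : List (List Int)) : pvMix g 0 0 = g := by
  unfold pvMix
  apply List.ext_getElem (by simp)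
  intro y h1 h2
  simp only [List.getElem_mapIdx]
  apply mapIdx_ext_self
  intro x hx
  simp

lemma mix_row_end (g : List (List Int)) (Y : Nat)
    (hrect : ∀ row ∈ g, row.length = (g.getD 0 []).length) :
    pvMix g Y ((g.getD 0 []).length) = pvMix g (Y+1) 0 := by
  unfold pvMix
  apply gridIdx_congr
  intro y x hy hx
  have hxw : x < (g.getD 0 []).length := by
    rw [← hrect (g[y]'hy) (List.getElem_mem hy)]; exact hx
  have : (y < Y ∨ (y = Y ∧ x < (g.getD 0 []).length)) ↔ (y < Y + 1 ∨ (y = Y + 1 ∧ x < 0)) := by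
    omega
  rw [if_congr (and_congr_left fun _ => this) rfl rfl]

lemma visited_false (h w Y x : Nat) :
    ((((List.range h).map (fun _ => List.replicate w false)).getD Y []).getD x false) = false := by
  by_cases hY : Y < h
  · rw [List.getD_eq_getElem ((List.range h).map (fun _ => List.replicate w false)) [] (by simpa using hY)]
    rw [List.getElem_map]
    by_cases hx : x < w
    · rw [List.getD_eq_getElem _ _ (by simpa using hx)]
      simp
    · rw [List.getD_eq_default _ _ (by simpa using not_lt.mp hx)]
  · rw [List.getD_eq_default ((List.range h).map (fun _ => List.replicate w false)) [] (by simpa using not_lt.mp hY)]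
    rfl

-- the inner loop over row Y turns pvMix g Y 0 into pvMix g Y w
lemma inner_loop (g : List (List Int)) (Y : Nat) (hY : Y < g.length)
    (hrect : ∀ row ∈ g, row.length = (g.getD 0 []).length) (X : Nat)
    (hX : X ≤ (g.getD 0 []).length) :
    (List.range X).foldl
      (fun gg x =>
        if pvGet gg Y x == 59 && !((((List.range g.length).map (fun _ => List.replicate (g.getD 0 []).length false)).getD Y []).getD x false) then
          pvStep g.length (g.getD 0 []).length gg Y x
        else gg)
      (pvMix g Y 0)
    = pvMix g Y X := by
  induction X with
  | zero => rfl
  | succ X ih =>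
    have hXw : X < (g.getD 0 []).length := Nat.lt_of_succ_le hX
    have hrow : (g.getD Y []).length = (g.getD 0 []).length := by
      rw [List.getD_eq_getElem g [] hY]
      exact hrect _ (List.getElem_mem hY)
    have hXrow : X < (g.getD Y []).length := by rw [hrow]; exact hXw
    rw [List.range_succ, List.foldl_append, ih (Nat.le_of_succ_le hX)]
    simp only [List.foldl_cons, List.foldl_nil, visited_false, Bool.not_false, Bool.and_true]
    have hcell : pvGet (pvMix g Y X) Y X = pvGet g Y X := by
      rw [mix_get g Y X Y X hY hXrow, if_neg]
      rintro ⟨h, -⟩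
      omega
    by_cases h59 : pvGet g Y X = 59
    · rw [if_pos (by rw [hcell, h59]; rfl)]
      rw [step_eq_set _ _ _ _ _ (by rw [mix_length]; exact hY)
            (by rw [mix_row_length]; exact hXrow) (by rw [hcell]; exact h59)]
      rw [chain_eq_alt g (pvMix g Y X) (fun y x => mix_ge32 g Y X y x) Y X hY hXw]
      exact set_mix g Y X hY hXrow h59
    · rw [if_neg (by rw [hcell]; simpa using h59)]
      exact (mix_succ_of_ne g Y X h59).symm

lemma outer_loop (g : List (List Int))
    (hrect : ∀ row ∈ g, row.length = (g.getD 0 []).length) (Y : Nat) (hY : Y ≤ g.length) :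
    (List.range Y).foldl
      (fun gg y =>
        (List.range ((gg.getD y []).length)).foldl
          (fun gg x =>
            if pvGet gg y x == 59 && !((((List.range g.length).map (fun _ => List.replicate (g.getD 0 []).length false)).getD y []).getD x false) then
              pvStep g.length (g.getD 0 []).length gg y x
            else gg)
          gg)
      g
    = pvMix g Y 0 := by
  induction Y with
  | zero => exact (mix_zero g).symm
  | succ Y ih =>
    have hY' : Y < g.length := Nat.lt_of_succ_le hY
    rw [List.range_succ, List.foldl_append, ih (Nat.le_of_succ_le hY)]
    simp only [List.foldl_cons, List.foldl_nil]
    have hlen : ((pvMix g Y 0).getD Y []).length = (g.getD 0 []).length := by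
      rw [mix_row_length, List.getD_eq_getElem g [] hY']
      exact hrect _ (List.getElem_mem hY')
    rw [hlen, inner_loop g Y hY' hrect _ le_rfl]
    exact mix_row_end g Y hrect

lemma mix_full (g : List (List Int)) (hne : g.length ≠ 0) :
    pvMix g g.length 0 = build_boulders_alt g := by
  unfold pvMix build_boulders_alt
  rw [if_neg hne]
  apply gridIdx_congr
  intro y x hy hx
  have : ((y < g.length ∨ (y = g.length ∧ x < 0)) ∧ (g[y]'hy)[x]'hx = 59) ↔
      (((g[y]'hy)[x]'hx == 59) = true) := by
    simp only [beq_iff_eq]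
    exact ⟨fun h => h.2, fun h => ⟨Or.inl hy, h⟩⟩
  rw [if_congr this rfl rfl]

-- the no-59 identity case (any shape)
lemma no59_A (g : List (List Int)) (hno : ∀ row ∈ g, (59:Int) ∉ row) :
    build_boulders g = g := by
  unfold build_boulders
  by_cases hne : g.length = 0
  · rw [if_pos hne]
  · rw [if_neg hne]
    have key : ∀ y x : Nat, pvGet g y x ≠ 59 := by
      intro y x h
      unfold pvGet at h
      by_cases hy : y < g.length
      · by_cases hx : x < (g.getD y []).length
        · rw [List.getD_eq_getElem _ 0 hx] at h
          refine hno (g.getD y []) ?_ (h ▸ List.getElem_mem hx)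
          rw [List.getD_eq_getElem g [] hy]
          exact List.getElem_mem hy
        · rw [List.getD_eq_default _ 0 (not_lt.mp hx)] at h
          norm_num at h
      · rw [List.getD_eq_default g [] (not_lt.mp hy)] at h
        norm_num at h
    have inner : ∀ (y : Nat) (l : List Nat),
        l.foldl (fun gg x =>
          if pvGet gg y x == 59 && !((((List.range g.length).map (fun _ => List.replicate (g.getD 0 []).length false)).getD y []).getD x false) then
            pvStep g.length (g.getD 0 []).length gg y x
          else gg) g = g := by
      intro y l
      induction l with
      | nil => rfl
      | cons a l ihl =>
        rw [List.foldl_cons, if_neg (by simp [key y a])]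
        exact ihl
    have outer : ∀ l : List Nat,
        l.foldl (fun gg y =>
          (List.range ((gg.getD y []).length)).foldl
            (fun gg x =>
              if pvGet gg y x == 59 && !((((List.range g.length).map (fun _ => List.replicate (g.getD 0 []).length false)).getD y []).getD x false) then
                pvStep g.length (g.getD 0 []).length gg y x
              else gg) gg) g = g := by
      intro l
      induction l with
      | nil => rfl
      | cons a l ihl =>
        rw [List.foldl_cons, inner a _]
        exact ihl
    exact outer (List.range g.length)

lemma no59_B (g : List (List Int)) (hno : ∀ row ∈ g, (59:Int) ∉ row) :
    build_boulders_alt g = g := by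
  unfold build_boulders_alt
  split
  · rfl
  · apply List.ext_getElem (by simp)
    intro y h1 h2
    simp only [List.getElem_mapIdx]
    apply mapIdx_ext_self
    intro x hx
    rw [if_neg]
    simp only [beq_iff_eq]
    intro hv
    exact hno _ (List.getElem_mem h2) (hv ▸ List.getElem_mem hx)

-- ===== VERDICT (by name: the statement is the Claim_ definition above) =====
theorem build_boulders_spec : Claim_equal_build_boulders := by
  intro g _ hpre
  unfold Spec_build_boulders
  rcases hpre with hrect | hno
  · by_cases hne : g.length = 0
    · rcases g with _ | _ <;> simp_all [build_boulders, build_boulders_alt]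
    · have hA : build_boulders g = pvMix g g.length 0 := by
        unfold build_boulders
        simp only [if_neg hne]
        exact outer_loop g hrect g.length le_rfl
      rw [hA, mix_full g hne]
  · rw [no59_A g hno, no59_B g hno]
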